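-- pv_equiv track=rewrite | github.com/Manojshekar63/NH-SJC25HACK-AIML-027-code4tech | backend/services/langchain_summarizer.py | _select_key_findings
-- ===== SOURCE A (Python) =====
-- from typing import Dict, Any, List
--
-- def _select_key_findings(sentences: List[str], max_items: int = 6) -> List[str]:
--     if not sentences:
--         return []
--     # Simple scoring: prefer sentences with quantitative signals or medical keywords
--     keywords = [
--         "randomized", "double-blind", "cohort", "meta-analysis", "significant",
--         "%", "p=", "p <", "hazard ratio", "odds ratio", "risk", "confidence interval",
--         "reduction", "increase", "improved", "benefit", "adverse", "safety",
--     ]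
--     def score(s: str) -> int:
--         base = 0
--         for kw in keywords:
--             if kw.lower() in s.lower():
--                 base += 2
--         # Slightly prefer medium length
--         length_bonus = 1 if 80 <= len(s) <= 240 else 0
--         return base + length_bonus
--     ranked = sorted(sentences, key=score, reverse=True)
--     # Ensure diversity by picking from different regions
--     picks: List[str] = []
--     used_idx: set[int] = set()
--     for cand in ranked:
--         for i, s in enumerate(sentences):
--             if s == cand and i not in used_idx:
--                 picks.append(cand)
--                 used_idx.add(i)
--                 break
--         if len(picks) >= max_items:
--             break
--     if not picks:
--         # Fallback to first few sentences
--         picks = sentences[:max_items]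
--     return picks
-- ===== SOURCE B (Python) =====
-- from typing import List
--
-- _KEYWORDS = [
--     "randomized", "double-blind", "cohort", "meta-analysis", "significant",
--     "%", "p=", "p <", "hazard ratio", "odds ratio", "risk", "confidence interval",
--     "reduction", "increase", "improved", "benefit", "adverse", "safety",
-- ]
--
-- def _score(s: str) -> int:
--     low = s.lower()
--     base = sum(2 for kw in _KEYWORDS if kw in low)
--     return base + (1 if 80 <= len(s) <= 240 else 0)
--
-- def _select_key_findings(sentences: List[str], max_items: int = 6) -> List[str]:
--     if not sentences or max_items <= 0:
--         return []
--     scores = [_score(s) for s in sentences]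
--     ranked = []
--     for sc in sorted(set(scores), reverse=True):
--         ranked.extend(s for s, s2 in zip(sentences, scores) if s2 == sc)
--     return ranked[:max_items]
-- ===== Notes on version B (the rewrite author's own statement) =====
-- stated objective: faster
-- what changed: B scores each sentence once and groups sentences into score buckets concatenated in descending score order (bucket selection), replacing A's stable comparison sort followed by a per-picked-candidate used-index rescan of the whole sentence list.
-- intended difference: On inputs with at least one sentence and max_items <= 0, A's append-then-check loop still returns one sentence (the top-ranked one); B returns the empty selection, the intended result when at most zero items are requested. — e.g. on _select_key_findings(["a"], 0): A returns ["a"], B returns []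
import Mathlib
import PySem

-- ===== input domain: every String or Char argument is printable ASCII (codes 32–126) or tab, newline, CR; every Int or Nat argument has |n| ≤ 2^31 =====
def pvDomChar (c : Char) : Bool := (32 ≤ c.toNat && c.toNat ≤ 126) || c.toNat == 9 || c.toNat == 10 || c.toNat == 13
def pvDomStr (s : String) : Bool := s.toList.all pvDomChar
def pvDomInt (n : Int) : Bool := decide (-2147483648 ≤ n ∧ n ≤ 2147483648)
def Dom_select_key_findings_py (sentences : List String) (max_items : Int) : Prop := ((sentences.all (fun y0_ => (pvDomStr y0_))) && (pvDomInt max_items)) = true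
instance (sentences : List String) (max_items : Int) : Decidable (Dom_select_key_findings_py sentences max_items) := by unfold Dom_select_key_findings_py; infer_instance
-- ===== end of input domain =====

-- B replaces A's stable comparison sort + quadratic used-index dedup scan by a per-score bucket pass
-- (group sentences by score, concatenate buckets in descending score order, take the first max_items);
-- objective: faster (one bucket pass instead of a rescan of all sentences per picked candidate). On nonempty input with max_items <= 0, A returns one sentence; B returns [] (see D_ below).


-- ===== PORT A =====
def pyKeywords : List String :=
  ["randomized", "double-blind", "cohort", "meta-analysis", "significant",
   "%", "p=", "p <", "hazard ratio", "odds ratio", "risk", "confidence interval",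
   "reduction", "increase", "improved", "benefit", "adverse", "safety"]

-- A's inner `score`: +2 per keyword hit (kw.lower() in s.lower()), +1 length bonus for 80 <= len(s) <= 240
def pyScore (s : String) : Int :=
  let base := pyKeywords.foldl
    (fun base kw => if PySem.Str.isIn (PySem.Str.lower kw) (PySem.Str.lower s) then base + 2 else base) 0
  let length_bonus : Int := if 80 ≤ PySem.Str.len s ∧ PySem.Str.len s ≤ 240 then 1 else 0
  base + length_bonus

-- A's outer loop over `ranked`; the inner `for i, s in enumerate(sentences): … break` is first-match search
def pickLoop (enum : List (Int × String)) (mi : Int) :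
    List String → List String → PySem.Set Int → List String
  | [], picks, _ => picks
  | cand :: rest, picks, used =>
      match List.find? (fun p => p.2 == cand && !(used.contains p.1)) enum with
      | some p =>
          let picks' := picks ++ [cand]
          let used' := used.add p.1
          if mi ≤ (picks'.length : Int) then picks' else pickLoop enum mi rest picks' used'
      | none => if mi ≤ (picks.length : Int) then picks else pickLoop enum mi rest picks used

def select_key_findings_py (sentences : List String) (max_items : Int) : List String :=
  if sentences = [] then []
  else
    let ranked := PySem.List.sorted sentences pyScore true
    let picks := pickLoop (PySem.List.enumerate sentences 0) max_items ranked [] PySem.Set.empty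
    if picks = [] then PySem.List.slice sentences none (some max_items) else picks

-- ===== PORT B =====
def altKeywords : List String :=
  ["randomized", "double-blind", "cohort", "meta-analysis", "significant",
   "%", "p=", "p <", "hazard ratio", "odds ratio", "risk", "confidence interval",
   "reduction", "increase", "improved", "benefit", "adverse", "safety"]

-- Source B's `_score`: sum(2 for kw in _KEYWORDS if kw in low) + length bonus
def altScore (s : String) : Int :=
  let low := PySem.Str.lower s
  let base := ((altKeywords.filter (fun kw => PySem.Str.isIn kw low)).map (fun _ => (2 : Int))).sum
  base + (if 80 ≤ PySem.Str.len s ∧ PySem.Str.len s ≤ 240 then 1 else 0)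

def select_key_findings_py_alt (sentences : List String) (max_items : Int) : List String :=
  if sentences = [] ∨ max_items ≤ 0 then []
  else
    let scores := sentences.map altScore
    let ranked := (PySem.List.sorted (PySem.Set.ofList scores) (fun x => x) true).foldl
      (fun acc sc => acc ++ ((sentences.zip scores).filter (fun p => p.2 == sc)).map (fun p => p.1)) []
    PySem.List.slice ranked none (some max_items)

-- ===== PRECONDITION & SPEC =====
-- On inputs with at least one sentence and max_items <= 0, A's append-then-check loop still
-- returns one sentence (the top-ranked one); B returns the empty selection, the intended
-- result when at most zero items are requested.
def D_select_key_findings_py (sentences : List String) (max_items : Int) : Prop :=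
  sentences ≠ [] ∧ max_items ≤ 0
instance (sentences : List String) (max_items : Int) : Decidable (D_select_key_findings_py sentences max_items) := by unfold D_select_key_findings_py; infer_instance

def Spec_select_key_findings_py (sentences : List String) (max_items : Int) (out : List String) : Prop := ¬ D_select_key_findings_py sentences max_items → out = select_key_findings_py_alt sentences max_items
instance (sentences : List String) (max_items : Int) (out : List String) : Decidable (Spec_select_key_findings_py sentences max_items out) := by unfold Spec_select_key_findings_py; infer_instance

def pvDiffWitness_select_key_findings_py : List String × Int := (["a"], 0)
def pvDiffWitnessOut_select_key_findings_py : (List String) × (List String) := (["a"], [])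

-- ===== CLAIM (what is proved, stated in full; the proofs are below) =====
def Claim_unchanged_select_key_findings_py : Prop := ∀ (sentences : List String) (max_items : Int), Dom_select_key_findings_py sentences max_items → Spec_select_key_findings_py sentences max_items (select_key_findings_py sentences max_items)
def Claim_changed_select_key_findings_py : Prop := Dom_select_key_findings_py (pvDiffWitness_select_key_findings_py.1) (pvDiffWitness_select_key_findings_py.2) ∧ D_select_key_findings_py (pvDiffWitness_select_key_findings_py.1) (pvDiffWitness_select_key_findings_py.2) ∧ select_key_findings_py (pvDiffWitness_select_key_findings_py.1) (pvDiffWitness_select_key_findings_py.2) = pvDiffWitnessOut_select_key_findings_py.1 ∧ select_key_findings_py_alt (pvDiffWitness_select_key_findings_py.1) (pvDiffWitness_select_key_findings_py.2) = pvDiffWitnessOut_select_key_findings_py.2 ∧ pvDiffWitnessOut_select_key_findings_py.1 ≠ pvDiffWitnessOut_select_key_findings_py.2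
def Claim_exact_select_key_findings_py : Prop := ∀ (sentences : List String) (max_items : Int), Dom_select_key_findings_py sentences max_items → D_select_key_findings_py sentences max_items → select_key_findings_py sentences max_items ≠ select_key_findings_py_alt sentences max_items

-- ===== LEMMAS AND PROOFS =====

-- the two score functions agree
lemma foldl_add_two (p : String → Bool) (l : List String) (acc : Int) :
    l.foldl (fun b kw => if p kw then b + 2 else b) acc
      = acc + ((l.filter p).map (fun _ => (2 : Int))).sum := by
  induction l generalizing acc with
  | nil => simp
  | cons x xs ih =>
      by_cases h : p x <;> simp [List.foldl, h, ih] <;> ring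

lemma score_eq : ∀ s, altScore s = pyScore s := by
  intro s
  have hkw : ∀ kw ∈ pyKeywords, PySem.Str.lower kw = kw := by decide
  unfold altScore pyScore
  rw [show altKeywords = pyKeywords from rfl]
  rw [PySem.List.foldl_congr_mem pyKeywords _
      (fun b kw => if PySem.Str.isIn kw (PySem.Str.lower s) then b + 2 else b) 0
      (by intro acc kw hm; rw [hkw kw hm])]
  rw [foldl_add_two]
  simp

-- filtering the (sentence, score) zip by score is filtering sentences by score
lemma zip_filter_map (f : String → Int) (xs : List String) (v : Int) :
    (((xs.zip (xs.map f)).filter (fun p => p.2 == v)).map (fun p => p.1))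
      = xs.filter (fun s => f s == v) := by
  induction xs with
  | nil => simp
  | cons x xs ih =>
      rw [show (x :: xs).zip ((x :: xs).map f) = (x, f x) :: xs.zip (xs.map f) from rfl]
      by_cases h : f x = v
      · rw [List.filter_cons, if_pos (by simp [h]), List.map_cons, ih,
          List.filter_cons, if_pos (by simp [h])]
      · rw [List.filter_cons, if_neg (by simp [h]), ih,
          List.filter_cons, if_neg (by simp [h])]

-- ---------- uniqueness of the descending stable arrangement ----------
lemma stable_desc_unique (key : String → Int) :
    ∀ (ys zs : List String),
      ys.Pairwise (fun a b => key b ≤ key a) → zs.Pairwise (fun a b => key b ≤ key a) →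
      (∀ v : Int, ys.filter (fun s => key s == v) = zs.filter (fun s => key s == v)) →
      ys = zs := by
  intro ys
  induction ys with
  | nil =>
      intro zs _ _ hf
      cases zs with
      | nil => rfl
      | cons b zs' =>
          have := hf (key b)
          simp at this
  | cons a ys' ih =>
      intro zs hys hzs hf
      cases zs with
      | nil =>
          have := hf (key a)
          simp at this
      | cons b zs' =>
          have ha_mem : a ∈ List.filter (fun s => key s == key a) (b :: zs') := by
            rw [← hf (key a)]; simp
          have ha_in := List.mem_of_mem_filter ha_mem
          have hb_mem : b ∈ List.filter (fun s => key s == key b) (a :: ys') := by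
            rw [hf (key b)]; simp
          have hb_in := List.mem_of_mem_filter hb_mem
          have hle1 : key a ≤ key b := by
            rcases List.mem_cons.mp ha_in with h | h
            · exact le_of_eq (by rw [h])
            · exact (List.pairwise_cons.mp hzs).1 a h
          have hle2 : key b ≤ key a := by
            rcases List.mem_cons.mp hb_in with h | h
            · exact le_of_eq (by rw [h])
            · exact (List.pairwise_cons.mp hys).1 b h
          have hkey : key a = key b := le_antisymm hle1 hle2
          have hfa := hf (key a)
          rw [List.filter_cons, List.filter_cons] at hfa
          simp [← hkey] at hfa
          obtain ⟨hab, htail⟩ := hfa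
          subst hab
          congr 1
          refine ih zs' (List.pairwise_cons.mp hys).2 (List.pairwise_cons.mp hzs).2 ?_
          intro v
          by_cases hv : v = key a
          · subst hv; exact htail
          · have hne : ¬ (key a = v) := fun hh => hv hh.symm
            have hthis := hf v
            rw [List.filter_cons, List.filter_cons] at hthis
            simp [hne] at hthis
            exact hthis

-- ---------- stability of PySem's sorted: it preserves each score class ----------
lemma insertBy_pairwise (key : String → Int) (x : String) :
    ∀ (l : List String), l.Pairwise (fun a b => key b ≤ key a) →
      (PySem.List.insertBy (fun a b => decide (key b < key a)) x l).Pairwise (fun a b => key b ≤ key a) := by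
  intro l
  induction l with
  | nil => intro _; simp [PySem.List.insertBy]
  | cons y ys ih =>
      intro hp
      obtain ⟨hy, hys⟩ := List.pairwise_cons.mp hp
      by_cases h : key y < key x
      · simp [PySem.List.insertBy, h]
        refine ⟨⟨le_of_lt h, fun z hz => le_trans (hy z hz) (le_of_lt h)⟩, hy, hys⟩
      · simp only [PySem.List.insertBy, h, decide_false, Bool.false_eq_true, if_false, decide_eq_true_eq, if_neg]
        refine List.pairwise_cons.mpr ⟨?_, ih hys⟩
        intro z hz
        rcases (PySem.List.mem_insertBy _ _ _ _).mp hz with hzx | hzy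
        · subst hzx; omega
        · exact hy z hzy

lemma filter_insertBy (key : String → Int) (x : String) (v : Int) :
    ∀ (l : List String), l.Pairwise (fun a b => key b ≤ key a) →
      (PySem.List.insertBy (fun a b => decide (key b < key a)) x l).filter (fun s => key s == v)
        = (l ++ [x]).filter (fun s => key s == v) := by
  intro l
  induction l with
  | nil => intro _; simp [PySem.List.insertBy]
  | cons y ys ih =>
      intro hp
      obtain ⟨hy, hys⟩ := List.pairwise_cons.mp hp
      by_cases h : key y < key x
      · -- x is inserted in front: every element of y :: ys has key < key x
        rw [show PySem.List.insertBy (fun a b => decide (key b < key a)) x (y :: ys)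
              = x :: y :: ys by simp [PySem.List.insertBy, h]]
        by_cases hxv : key x = v
        · -- the tail contributes nothing at score v
          have hnil : (y :: ys).filter (fun s => key s == v) = [] := by
            refine List.filter_eq_nil_iff.mpr ?_
            intro z hz
            have hzy : key z ≤ key y := by
              rcases List.mem_cons.mp hz with hzy | hzy
              · exact le_of_eq (by rw [hzy])
              · exact hy z hzy
            simp only [beq_iff_eq]
            omega
          rw [List.filter_cons, if_pos (by simp [hxv])]
          rw [show ((y :: ys) ++ [x]).filter (fun s => key s == v)
                = (y :: ys).filter (fun s => key s == v) ++ [x].filter (fun s => key s == v)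
              from List.filter_append _ _]
          rw [hnil]
          simp [hxv]
        · rw [List.filter_cons, if_neg (by simp [hxv]),
            show ((y :: ys) ++ [x]).filter (fun s => key s == v)
              = (y :: ys).filter (fun s => key s == v) ++ [x].filter (fun s => key s == v)
            from List.filter_append _ _]
          simp [hxv]
      · rw [show PySem.List.insertBy (fun a b => decide (key b < key a)) x (y :: ys)
              = y :: PySem.List.insertBy (fun a b => decide (key b < key a)) x ys by
            simp [PySem.List.insertBy, h]]
        rw [List.filter_cons, show ((y :: ys) ++ [x]) = y :: (ys ++ [x]) from rfl, List.filter_cons]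
        by_cases hyv : key y = v
        · rw [if_pos (by simp [hyv]), if_pos (by simp [hyv]), ih hys]
        · rw [if_neg (by simp [hyv]), if_neg (by simp [hyv]), ih hys]

lemma sorted_filter_stable (key : String → Int) (xs : List String) (v : Int) :
    (PySem.List.sorted xs key true).filter (fun s => key s == v)
      = xs.filter (fun s => key s == v) := by
  rw [PySem.List.sorted_rev_eq_foldl_insertBy]
  suffices h : ∀ (acc : List String), acc.Pairwise (fun a b => key b ≤ key a) →
      (xs.foldl (fun acc x => PySem.List.insertBy (fun a b => decide (key b < key a)) x acc) acc).filter
          (fun s => key s == v)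
        = (acc ++ xs).filter (fun s => key s == v) by
    simpa using h [] (by simp)
  induction xs with
  | nil => intro acc _; simp
  | cons x xs ih =>
      intro acc hacc
      rw [List.foldl_cons, ih _ (insertBy_pairwise key x acc hacc),
        List.filter_append, filter_insertBy key x v acc hacc]
      simp only [List.filter_append, List.append_assoc, List.append_cancel_left_eq]
      rw [show x :: xs = [x] ++ xs from rfl, List.filter_append]

-- ---------- B's bucket concatenation: same three properties ----------
lemma bucket_filter (key : String → Int) (xs : List String) (v : Int) :
    ∀ (l : List Int), l.Nodup → (v ∈ xs.map key → v ∈ l) →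
      (l.flatMap (fun u => xs.filter (fun s => key s == u))).filter (fun s => key s == v)
        = xs.filter (fun s => key s == v) := by
  intro l
  induction l with
  | nil =>
      intro _ hcl
      simp only [List.flatMap_nil, List.filter_nil]
      refine (List.filter_eq_nil_iff.mpr ?_).symm
      intro s hs
      simp only [beq_iff_eq]
      intro hv
      exact absurd (hcl (hv ▸ List.mem_map_of_mem hs)) (by simp)
  | cons u l' ih =>
      intro hnd hcl
      rw [List.flatMap_cons, List.filter_append, List.filter_filter]
      by_cases huv : u = v
      · subst huv
        have h1 : xs.filter (fun s => (key s == u) && (key s == u)) = xs.filter (fun s => key s == u) := by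
          apply List.filter_congr; intro s _; by_cases h : key s = u <;> simp [h]
        have h2 : (l'.flatMap (fun w => xs.filter (fun s => key s == w))).filter (fun s => key s == u) = [] := by
          refine List.filter_eq_nil_iff.mpr ?_
          intro s hs
          obtain ⟨w, hw, hsw⟩ := List.mem_flatMap.mp hs
          have hkw : key s = w := by simpa using List.of_mem_filter hsw
          have hwu : w ≠ u := fun h => (List.nodup_cons.mp hnd).1 (h ▸ hw)
          simp [hkw, hwu]
        rw [h1, h2, List.append_nil]
      · have h1 : xs.filter (fun s => (key s == v) && (key s == u)) = [] := by
          refine List.filter_eq_nil_iff.mpr ?_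
          intro s _
          by_cases h : key s = v
          · simp [h, show v ≠ u from fun hh => huv hh.symm]
          · simp [h]
        rw [h1, List.nil_append]
        exact ih (List.nodup_cons.mp hnd).2 (fun hv => by
          rcases List.mem_cons.mp (hcl hv) with h | h
          · exact absurd h.symm huv
          · exact h)

lemma bucket_pairwise (key : String → Int) (xs : List String) (l : List Int)
    (hl : l.Pairwise (fun a b => b < a)) :
    (l.flatMap (fun u => xs.filter (fun s => key s == u))).Pairwise (fun a b => key b ≤ key a) := by
  rw [List.pairwise_flatMap]
  constructor
  · intro u _
    have : ∀ a ∈ xs.filter (fun s => key s == u), ∀ b ∈ xs.filter (fun s => key s == u),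
        key b ≤ key a := by
      intro a ha b hb
      have h1 : key a = u := by simpa using List.of_mem_filter ha
      have h2 : key b = u := by simpa using List.of_mem_filter hb
      omega
    exact List.pairwise_of_forall_mem_list (fun a ha b hb => this a ha b hb)
  · refine hl.imp_of_mem ?_
    intro u w hu hw hlt a ha b hb
    have h1 : key a = u := by simpa using List.of_mem_filter ha
    have h2 : key b = w := by simpa using List.of_mem_filter hb
    omega

lemma bucket_eq (key : String → Int) (xs : List String) :
    PySem.List.sorted xs key true
      = (PySem.List.sorted (PySem.Set.ofList (xs.map key)) (fun x => x) true).flatMap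
          (fun u => xs.filter (fun s => key s == u)) := by
  have hnd : (PySem.List.sorted (PySem.Set.ofList (xs.map key)) (fun x => x) true).Nodup :=
    (PySem.List.sorted_perm _ _ _).nodup_iff.mpr (PySem.Set.nodup_ofList _)
  have hdesc : (PySem.List.sorted (PySem.Set.ofList (xs.map key)) (fun x => x) true).Pairwise
      (fun a b => b < a) := by
    have h1 := PySem.List.sorted_pairwise_rev (PySem.Set.ofList (xs.map key)) (fun x => x)
    have h2 := List.Pairwise.and h1 hnd
    exact h2.imp (fun {a b} h => lt_of_le_of_ne h.1 (Ne.symm h.2))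
  refine stable_desc_unique key _ _ (PySem.List.sorted_pairwise_rev xs key)
    (bucket_pairwise key xs _ hdesc) ?_
  intro v
  rw [sorted_filter_stable key xs v]
  refine (bucket_filter key xs v _ hnd ?_).symm
  intro hv
  rw [PySem.List.mem_sorted, PySem.Set.mem_ofList]
  exact hv

-- ---------- A's pick loop returns a prefix of ranked ----------
-- counting sentences equal to v among the enumerate pairs
lemma countP_enum_snd (sentences : List String) (v : String) :
    (PySem.List.enumerate sentences 0).countP (fun p => p.2 == v) = sentences.count v := by
  rw [List.count]
  conv_rhs => rw [← PySem.List.map_snd_enumerate sentences 0]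
  rw [List.countP_map]
  rfl

lemma set_contains_iff (s : PySem.Set Int) (a : Int) : s.contains a = true ↔ a ∈ s :=
  List.contains_iff_mem

-- marking one fresh index i (of a pair (i, v₀) in l) raises the used-count of v₀ by one
lemma countP_mark (v₀ : String) (v : String) :
    ∀ (l : List (Int × String)), l.Pairwise (fun a b => a.1 < b.1) →
      ∀ (i : Int) (used : PySem.Set Int), (i, v₀) ∈ l → used.contains i = false →
      l.countP (fun p => (used.add i).contains p.1 && p.2 == v)
        = l.countP (fun p => used.contains p.1 && p.2 == v) + (if v₀ == v then 1 else 0) := by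
  intro l
  induction l with
  | nil => intro _ i used hm _; simp at hm
  | cons y l' ih =>
      intro hpw i used hm hfresh
      obtain ⟨hy, hl'⟩ := List.pairwise_cons.mp hpw
      rw [List.countP_cons, List.countP_cons]
      rcases List.mem_cons.mp hm with hhead | htail
      · -- y = (i, v₀)
        have htailP : l'.countP (fun p => (used.add i).contains p.1 && p.2 == v)
            = l'.countP (fun p => used.contains p.1 && p.2 == v) := by
          refine List.countP_congr ?_
          intro p hp
          have hne : p.1 ≠ i := by
            have := hy p hp
            rw [← hhead] at this
            omega
          constructor
          · intro hc
            obtain ⟨h1, h2⟩ := Bool.and_eq_true_iff.mp hc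
            refine Bool.and_eq_true_iff.mpr ⟨?_, h2⟩
            rcases (PySem.Set.mem_add used i p.1).mp ((set_contains_iff _ _).mp h1) with h | h
            · exact (set_contains_iff _ _).mpr h
            · exact absurd h hne
          · intro hc
            obtain ⟨h1, h2⟩ := Bool.and_eq_true_iff.mp hc
            refine Bool.and_eq_true_iff.mpr ⟨?_, h2⟩
            exact (set_contains_iff _ _).mpr
              ((PySem.Set.mem_add used i p.1).mpr (Or.inl ((set_contains_iff _ _).mp h1)))
        rw [htailP, ← hhead]
        have hnew : ((used.add i).contains i) = true :=
          (set_contains_iff _ _).mpr ((PySem.Set.mem_add used i i).mpr (Or.inr rfl))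
        have hniu : i ∉ used := fun h => by
          rw [(set_contains_iff _ _).mpr h] at hfresh; cases hfresh
        by_cases hv : v₀ = v
        · simp [hnew, hfresh, hv, hniu]
        · simp [hnew, hfresh, hv, hniu]
      · -- (i, v₀) is in the tail; the head's index differs from i
        have hne : y.1 ≠ i := by
          have := hy (i, v₀) htail
          omega
        have hadd : (used.add i).contains y.1 = used.contains y.1 := by
          by_cases hmem : y.1 ∈ used
          · have a1 : (used.add i).contains y.1 = true :=
              (set_contains_iff _ _).mpr ((PySem.Set.mem_add used i y.1).mpr (Or.inl hmem))
            have a2 : used.contains y.1 = true := (set_contains_iff _ _).mpr hmem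
            rw [a1, a2]
          · have a1 : (used.add i).contains y.1 = false := by
              rw [← Bool.not_eq_true, set_contains_iff _ _]
              intro hx
              rcases (PySem.Set.mem_add used i y.1).mp hx with h | h
              · exact hmem h
              · exact hne h
            have a2 : used.contains y.1 = false := by
              rw [← Bool.not_eq_true, set_contains_iff _ _]; exact hmem
            rw [a1, a2]
        rw [hadd, ih hl' i used htail hfresh]
        ring


lemma pickLoop_prefix (sentences : List String) (mi : Int) :
    ∀ (rest picks : List String) (used : PySem.Set Int),
      (picks ++ rest).Perm sentences →
      (∀ v, (PySem.List.enumerate sentences 0).countP (fun p => used.contains p.1 && p.2 == v) = picks.count v) →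
      (picks.length : Int) < mi →
      pickLoop (PySem.List.enumerate sentences 0) mi rest picks used
        = picks ++ rest.take (mi - picks.length).toNat := by
  intro rest
  induction rest with
  | nil => intro picks used _ _ _; simp [pickLoop]
  | cons cand rest' ih =>
      intro picks used hperm hinv hlen
      -- the inner scan always finds a fresh index carrying cand
      have hex : ∃ p ∈ PySem.List.enumerate sentences 0,
          (p.2 == cand && !(used.contains p.1)) = true := by
        by_contra hno
        push_neg at hno
        have hall : ∀ p ∈ PySem.List.enumerate sentences 0,
            (used.contains p.1 && p.2 == cand) = true ↔ (p.2 == cand) = true := by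
          intro p hp
          constructor
          · intro h; exact (Bool.and_eq_true_iff.mp h).2
          · intro h
            have := hno p hp
            rw [h] at this
            simp at this
            exact Bool.and_eq_true_iff.mpr ⟨(set_contains_iff _ _).mpr this, h⟩
        have hcnt : (PySem.List.enumerate sentences 0).countP
            (fun p => used.contains p.1 && p.2 == cand) = sentences.count cand := by
          rw [List.countP_congr hall, countP_enum_snd]
        have h1 := hinv cand
        have h2 := hperm.count_eq cand
        rw [List.count_append] at h2
        have h3 : (cand :: rest').count cand = rest'.count cand + 1 := by
          simp [List.count_cons]
        omega
      obtain ⟨p, hfind⟩ : ∃ p, (PySem.List.enumerate sentences 0).find?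
          (fun p => p.2 == cand && !(used.contains p.1)) = some p :=
        Option.isSome_iff_exists.mp (List.find?_isSome.mpr hex)
      have hprop := List.find?_some hfind
      obtain ⟨hpc, hpf⟩ := Bool.and_eq_true_iff.mp hprop
      have hpc' : p.2 = cand := by simpa using hpc
      have hpf' : used.contains p.1 = false := by simpa using hpf
      have hpmem : (p.1, cand) ∈ PySem.List.enumerate sentences 0 := by
        rw [← hpc']
        exact List.mem_of_find?_eq_some hfind
      rw [show pickLoop (PySem.List.enumerate sentences 0) mi (cand :: rest') picks used
            = (if mi ≤ ((picks ++ [cand]).length : Int) then picks ++ [cand]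
               else pickLoop (PySem.List.enumerate sentences 0) mi rest' (picks ++ [cand])
                 (used.add p.1)) by
          rw [pickLoop, hfind]]
      by_cases hstop : mi ≤ ((picks ++ [cand]).length : Int)
      · rw [if_pos hstop]
        have hone : (mi - picks.length).toNat = 1 := by
          simp only [List.length_append, List.length_cons, List.length_nil] at hstop
          omega
        rw [hone, List.take_succ_cons, List.take_zero]
      · rw [if_neg hstop]
        have hperm' : ((picks ++ [cand]) ++ rest').Perm sentences := by
          simpa using hperm
        have hinv' : ∀ v, (PySem.List.enumerate sentences 0).countP
            (fun q => (used.add p.1).contains q.1 && q.2 == v) = (picks ++ [cand]).count v := by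
          intro v
          rw [countP_mark cand v (PySem.List.enumerate sentences 0)
            (PySem.List.pairwise_lt_enumerate sentences 0) p.1 used hpmem hpf',
            hinv v, List.count_append, List.count_singleton]
        have hlen' : ((picks ++ [cand]).length : Int) < mi := by
          simp only [List.length_append, List.length_cons, List.length_nil] at hstop ⊢
          omega
        rw [ih (picks ++ [cand]) (used.add p.1) hperm' hinv' hlen']
        have hsplit : (mi - picks.length).toNat = (mi - (picks ++ [cand]).length).toNat + 1 := by
          simp only [List.length_append, List.length_cons, List.length_nil] at hstop ⊢
          omega
        rw [hsplit, List.take_succ_cons]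
        simp

-- the B-side ranked list is exactly A's stable sort
lemma alt_ranked_eq (sentences : List String) :
    ((PySem.List.sorted (PySem.Set.ofList (sentences.map altScore)) (fun x => x) true).foldl
        (fun acc sc => acc ++ ((sentences.zip (sentences.map altScore)).filter
          (fun p => p.2 == sc)).map (fun p => p.1)) [])
      = PySem.List.sorted sentences pyScore true := by
  rw [PySem.List.foldl_append_eq_flatMap]
  have hz : ∀ sc, ((sentences.zip (sentences.map altScore)).filter (fun p => p.2 == sc)).map
      (fun p => p.1) = sentences.filter (fun s => altScore s == sc) := fun sc =>
    zip_filter_map altScore sentences sc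
  calc ([] : List String) ++ (PySem.List.sorted (PySem.Set.ofList (sentences.map altScore))
          (fun x => x) true).flatMap (fun sc => ((sentences.zip (sentences.map altScore)).filter
            (fun p => p.2 == sc)).map (fun p => p.1))
      = (PySem.List.sorted (PySem.Set.ofList (sentences.map altScore)) (fun x => x) true).flatMap
          (fun sc => sentences.filter (fun s => altScore s == sc)) := by
        rw [List.nil_append]; exact List.flatMap_congr (fun sc _ => hz sc)
    _ = PySem.List.sorted sentences altScore true := (bucket_eq altScore sentences).symm
    _ = PySem.List.sorted sentences pyScore true := by rw [funext score_eq]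

-- A's picks phase yields the first max_items of ranked (for positive max_items)
lemma picks_eq_take (sentences : List String) (mi : Int) (hmi : 0 < mi) :
    pickLoop (PySem.List.enumerate sentences 0) mi
        (PySem.List.sorted sentences pyScore true) [] PySem.Set.empty
      = (PySem.List.sorted sentences pyScore true).take mi.toNat := by
  have h := pickLoop_prefix sentences mi (PySem.List.sorted sentences pyScore true) []
    PySem.Set.empty (by simpa using PySem.List.sorted_perm sentences pyScore true)
    (by intro v; simp [PySem.Set.empty, PySem.Set.contains]) (by simpa using hmi)
  simpa using h

theorem select_key_findings_py_spec : Claim_unchanged_select_key_findings_py := by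
  unfold Claim_unchanged_select_key_findings_py Spec_select_key_findings_py
  intro sentences mi _ hD
  by_cases hne : sentences = []
  · subst hne
    simp [select_key_findings_py, select_key_findings_py_alt]
  · have hmi : 0 < mi := by
      unfold D_select_key_findings_py at hD
      by_contra h
      exact hD ⟨hne, by omega⟩
    have hBcond : ¬(sentences = [] ∨ mi ≤ 0) := by
      intro h
      rcases h with h | h
      · exact hne h
      · omega
    rw [select_key_findings_py, if_neg hne, select_key_findings_py_alt, if_neg hBcond]
    have hrne : PySem.List.sorted sentences pyScore true ≠ [] := by
      rw [Ne, PySem.List.sorted_eq_nil_iff]; exact hne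
    obtain ⟨c, r, hr⟩ : ∃ c r, PySem.List.sorted sentences pyScore true = c :: r := by
      cases h : PySem.List.sorted sentences pyScore true with
      | nil => exact absurd h hrne
      | cons c r => exact ⟨c, r, rfl⟩
    have htake_ne : (PySem.List.sorted sentences pyScore true).take mi.toNat ≠ [] := by
      rw [hr]
      have h1 : mi.toNat = (mi.toNat - 1) + 1 := by omega
      rw [h1, List.take_succ_cons]
      simp
    show (if pickLoop (PySem.List.enumerate sentences 0) mi
            (PySem.List.sorted sentences pyScore true) [] PySem.Set.empty = []
          then PySem.List.slice sentences none (some mi)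
          else pickLoop (PySem.List.enumerate sentences 0) mi
            (PySem.List.sorted sentences pyScore true) [] PySem.Set.empty)
        = PySem.List.slice
            ((PySem.List.sorted (PySem.Set.ofList (sentences.map altScore)) (fun x => x) true).foldl
              (fun acc sc => acc ++ ((sentences.zip (sentences.map altScore)).filter
                (fun p => p.2 == sc)).map (fun p => p.1)) []) none (some mi)
    rw [picks_eq_take sentences mi hmi, if_neg htake_ne, alt_ranked_eq,
      PySem.List.slice_to _ (le_of_lt hmi)]

theorem select_key_findings_py_changed : Claim_changed_select_key_findings_py := by
  unfold Claim_changed_select_key_findings_py; decide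

theorem select_key_findings_py_tight : Claim_exact_select_key_findings_py := by
  unfold Claim_exact_select_key_findings_py
  intro sentences mi _ hD
  obtain ⟨hne, hle⟩ := hD
  rw [select_key_findings_py, if_neg hne, select_key_findings_py_alt, if_pos (Or.inr hle)]
  obtain ⟨c, r, hr⟩ : ∃ c r, PySem.List.sorted sentences pyScore true = c :: r := by
    cases h : PySem.List.sorted sentences pyScore true with
    | nil => exact absurd ((PySem.List.sorted_eq_nil_iff sentences pyScore true).mp h) hne
    | cons c r => exact ⟨c, r, rfl⟩
  have hc_mem : c ∈ sentences := by
    rw [← PySem.List.mem_sorted sentences pyScore true, hr]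
    exact List.mem_cons_self
  have hex : ∃ p ∈ PySem.List.enumerate sentences 0,
      (p.2 == c && !(PySem.Set.empty.contains p.1)) = true := by
    obtain ⟨k, hk, hck⟩ := List.mem_iff_getElem.mp hc_mem
    refine ⟨((0 : Int) + k, sentences[k]), ?_, ?_⟩
    · exact (PySem.List.mem_enumerate_iff sentences 0 _).mpr ⟨k, hk, rfl⟩
    · simp [PySem.Set.empty, PySem.Set.contains, hck]
  obtain ⟨p, hfind⟩ : ∃ p, (PySem.List.enumerate sentences 0).find?
      (fun p => p.2 == c && !(PySem.Set.empty.contains p.1)) = some p :=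
    Option.isSome_iff_exists.mp (List.find?_isSome.mpr hex)
  show (if pickLoop (PySem.List.enumerate sentences 0) mi
          (PySem.List.sorted sentences pyScore true) [] PySem.Set.empty = []
        then PySem.List.slice sentences none (some mi)
        else pickLoop (PySem.List.enumerate sentences 0) mi
          (PySem.List.sorted sentences pyScore true) [] PySem.Set.empty) ≠ []
  rw [hr]
  rw [show pickLoop (PySem.List.enumerate sentences 0) mi (c :: r) [] PySem.Set.empty
        = (if mi ≤ (([] ++ [c]).length : Int) then ([] : List String) ++ [c]
           else pickLoop (PySem.List.enumerate sentences 0) mi r ([] ++ [c])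
             (PySem.Set.empty.add p.1)) by
      rw [pickLoop, hfind]]
  have hcond : mi ≤ ((([] : List String) ++ [c]).length : Int) := by
    simp only [List.nil_append, List.length_cons, List.length_nil]
    omega
  rw [if_pos hcond]
  simp
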